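-- pv_equiv track=rewrite | github.com/BhuvaneshBhatt/SpecialFunctions | MultiplePolylogarithms/src/hpl.py | stuffle_product
-- ===== SOURCE A (Python) =====
-- from functools import lru_cache
--
-- def _sign(x) -> int:
--     if x > 0:
--         return 1
--     elif x < 0:
--         return -1
--     return 0
--
-- def pseudo_add(j: int, k: int) -> int:
--     """
--     Stuffle pseudo-addition: |j+k| with sign = sign(j) if sign(j)==sign(k), else -(|j|+|k|).
--     """
--     if _sign(j) == _sign(k):
--         return j + k  # same sign, usual addition
--     else:
--         return -(abs(j) + abs(k))
--
-- def stuffle_product(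
--     list1: tuple[int, ...], list2: tuple[int, ...]
-- ) -> list[tuple[int, ...]]:
--     """
--     Return the stuffle (quasi-shuffle) product of two MZV parameter lists.
--
--     The stuffle product operates on the **abbreviated** (compressed) notation
--     directly — an entry m with |m|>1 represents a single index of weight |m|,
--     and pseudo-addition combines two entries into one index of weight |m1|+|m2|.
--
--     Returns a list of parameter tuples (multiset), so equal results appear
--     multiple times (their count is the coefficient in the expansion).
--
--     Example
--     -------
--     stuffle_product((2,), (2,)) -> [(2,2), (2,2), (4,)]
--     meaning Z(2)*Z(2) = 2*Z(2,2) + Z(4)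
--     """
--     # Keep abbreviated notation — do NOT expand to full notation
--     list1 = tuple(list1)
--     list2 = tuple(list2)
--
--     @lru_cache(maxsize=None)
--     def _stuffle(a: tuple, b: tuple) -> list[tuple]:
--         if not a:
--             return [b]
--         if not b:
--             return [a]
--         # Case 1: take a[0] from a
--         result = [(a[0],) + t for t in _stuffle(a[1:], b)]
--         # Case 2: take b[0] from b
--         result += [(b[0],) + t for t in _stuffle(a, b[1:])]
--         # Case 3: pseudo-add a[0] and b[0] (stuffle extra term)
--         pa = pseudo_add(a[0], b[0])
--         if pa != 0:
--             result += [(pa,) + t for t in _stuffle(a[1:], b[1:])]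
--         return result
--
--     return _stuffle(list1, list2)
-- ===== SOURCE B (Python) =====
-- def _sign(x) -> int:
--     if x > 0:
--         return 1
--     elif x < 0:
--         return -1
--     return 0
--
-- def pseudo_add(j: int, k: int) -> int:
--     if _sign(j) == _sign(k):
--         return j + k
--     else:
--         return -(abs(j) + abs(k))
--
-- def stuffle_product(list1, list2):
--     """Iterative explicit-stack DFS building each output tuple front-to-back (no recursion, no memo table)."""
--     out = []
--     stack = [((), tuple(list1), tuple(list2))]
--     while stack:
--         pre, a, b = stack.pop()
--         if not a:
--             out.append(pre + b)
--             continue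
--         if not b:
--             out.append(pre + a)
--             continue
--         frames = [(pre + (a[0],), a[1:], b), (pre + (b[0],), a, b[1:])]
--         pa = pseudo_add(a[0], b[0])
--         if pa != 0:
--             frames.append((pre + (pa,), a[1:], b[1:]))
--         stack.extend(reversed(frames))
--     return out
-- ===== Notes on version B (the rewrite author's own statement) =====
-- stated objective: alternative
-- what changed: Replaced the memoized top-down recursion by an iterative depth-first traversal with an explicit stack of (prefix, a-suffix, b-suffix) frames that builds each output tuple front-to-back and appends it when a suffix empties.
import Mathlib
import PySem

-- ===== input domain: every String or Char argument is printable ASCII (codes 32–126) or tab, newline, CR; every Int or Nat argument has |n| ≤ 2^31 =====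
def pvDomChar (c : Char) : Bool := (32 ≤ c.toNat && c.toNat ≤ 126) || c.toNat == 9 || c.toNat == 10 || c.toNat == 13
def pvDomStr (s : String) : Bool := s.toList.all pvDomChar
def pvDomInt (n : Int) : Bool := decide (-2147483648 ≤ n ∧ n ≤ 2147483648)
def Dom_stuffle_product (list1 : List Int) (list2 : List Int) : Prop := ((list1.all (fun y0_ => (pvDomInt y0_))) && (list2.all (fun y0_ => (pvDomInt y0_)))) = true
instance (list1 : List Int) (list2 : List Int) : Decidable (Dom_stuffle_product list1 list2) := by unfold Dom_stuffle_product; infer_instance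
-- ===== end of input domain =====

-- B replaces A's memoized recursion by an iterative explicit-stack DFS that builds each
-- output tuple front-to-back (objective: alternative).

-- ===== PORT A =====
def pvSign (x : Int) : Int := if x > 0 then 1 else if x < 0 then -1 else 0

def pvPseudoAdd (j k : Int) : Int :=
  if pvSign j = pvSign k then j + k else -(|j| + |k|)

-- _stuffle: the lru_cache memoization does not change the computed value; the recursion is
-- ported as nested structural recursion (outer on a, inner on b)
def pvStuffleRow (x : Int) (a : List Int) (f : List Int → List (List Int)) : List Int → List (List Int)
  | [] => [x :: a]
  | y :: bs =>
      (f (y :: bs)).map (fun t => x :: t) ++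
      (pvStuffleRow x a f bs).map (fun t => y :: t) ++
      (if pvPseudoAdd x y ≠ 0 then (f bs).map (fun t => pvPseudoAdd x y :: t) else [])

def pvStuffle : List Int → List Int → List (List Int)
  | [], b => [b]
  | x :: a, b => pvStuffleRow x a (pvStuffle a) b

def stuffle_product (list1 : List Int) (list2 : List Int) : List (List Int) :=
  pvStuffle list1 list2

-- ===== PORT B =====
-- measure used only to justify that the while loop terminates
def pvMeas (st : List (List Int × List Int × List Int)) : Nat :=
  (st.map (fun f => 4 ^ (f.2.1.length + f.2.2.length))).sum

-- the while loop over the explicit stack; top of stack = head of the list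
def pvRun : List (List Int × List Int × List Int) → List (List Int)
  | [] => []
  | (pre, a1, b1) :: st =>
    match a1, b1 with
    | [], _ => (pre ++ b1) :: pvRun st
    | x :: a', [] => (pre ++ (x :: a')) :: pvRun st
    | x :: a', y :: b' =>
      let pa := pvPseudoAdd x y
      let frames := (pre ++ [x], a', y :: b') :: (pre ++ [y], x :: a', b') ::
        (if pa ≠ 0 then [(pre ++ [pa], a', b')] else [])
      pvRun (frames ++ st)
termination_by st => pvMeas st
decreasing_by
  all_goals simp only [pvMeas, List.map_append, List.sum_append, List.map_cons, List.sum_cons,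
    List.length_cons, List.length_nil]
  · exact Nat.lt_add_of_pos_left (Nat.pow_pos (by norm_num))
  · exact Nat.lt_add_of_pos_left (Nat.pow_pos (by norm_num))
  · have p0 : (0:Nat) < 4 ^ (a'.length + b'.length) := Nat.pow_pos (by norm_num)
    have q1 : 4 ^ (a'.length + (b'.length + 1)) = 4 * 4 ^ (a'.length + b'.length) := by
      rw [show a'.length + (b'.length + 1) = (a'.length + b'.length) + 1 from by omega, pow_succ]
      ring
    have q2 : 4 ^ (a'.length + 1 + b'.length) = 4 * 4 ^ (a'.length + b'.length) := by
      rw [show a'.length + 1 + b'.length = (a'.length + b'.length) + 1 from by omega, pow_succ]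
      ring
    have q3 : 4 ^ (a'.length + 1 + (b'.length + 1)) = 16 * 4 ^ (a'.length + b'.length) := by
      rw [show a'.length + 1 + (b'.length + 1) = (a'.length + b'.length) + 2 from by omega,
        pow_add]
      ring
    split <;> simp only [List.map_cons, List.map_nil, List.sum_cons, List.sum_nil] <;> omega

def stuffle_product_alt (list1 : List Int) (list2 : List Int) : List (List Int) :=
  pvRun [([], list1, list2)]

-- ===== PRECONDITION & SPEC =====
def Spec_stuffle_product (list1 : List Int) (list2 : List Int) (out : List (List Int)) : Prop := out = stuffle_product_alt list1 list2
instance (list1 : List Int) (list2 : List Int) (out : List (List Int)) : Decidable (Spec_stuffle_product list1 list2 out) := by unfold Spec_stuffle_product; infer_instance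

-- ===== CLAIM (what is proved, stated in full; the proofs are below) =====
def Claim_equal_stuffle_product : Prop := ∀ (list1 : List Int) (list2 : List Int), Dom_stuffle_product list1 list2 → Spec_stuffle_product list1 list2 (stuffle_product list1 list2)

-- ===== LEMMAS AND PROOFS =====

-- the DFS on a frame emits exactly the recursion's results, each with the prefix prepended
theorem pvRun_frame :
    ∀ (n : Nat) (pre a b : List Int) (st : List (List Int × List Int × List Int)),
      pvMeas ((pre, a, b) :: st) ≤ n →
      pvRun ((pre, a, b) :: st) = (pvStuffle a b).map (fun t => pre ++ t) ++ pvRun st := by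
  intro n
  induction n using Nat.strong_induction_on with
  | _ n ih =>
    intro pre a b st hm
    match a, b with
    | [], b => simp [pvRun, pvStuffle]
    | x :: a', [] => simp [pvRun, pvStuffle, pvStuffleRow]
    | x :: a', y :: b' =>
      rw [pvRun]
      have hpos : (0:Nat) < 4 ^ (a'.length + b'.length) := Nat.pow_pos (by norm_num)
      have hmono : ∀ m k : Nat, m ≤ k → 4 ^ m ≤ 4 ^ k := fun m k h =>
        Nat.pow_le_pow_right (by norm_num) h
      -- measure bookkeeping: every suffix frame stack has measure < pvMeas ((pre,x::a',y::b')::st) ≤ n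
      have hn : 4 ^ ((x :: a').length + (y :: b').length) + pvMeas st ≤ n := by
        simpa [pvMeas] using hm
    -- shorthand
      by_cases hpa : pvPseudoAdd x y ≠ 0
      · have h3 : pvMeas ((pre ++ [pvPseudoAdd x y], a', b') :: st) < n := by
          simp only [pvMeas, List.map_cons, List.sum_cons] at hn ⊢
          have := hmono (a'.length + b'.length) ((x :: a').length + (y :: b').length) (by simp; omega)
          have h4 : 4 ^ (a'.length + b'.length) < 4 ^ ((x :: a').length + (y :: b').length) := by
            apply Nat.pow_lt_pow_right (by norm_num); simp; omega
          omega
        have h2 : pvMeas ((pre ++ [y], x :: a', b') :: (pre ++ [pvPseudoAdd x y], a', b') :: st) < n := by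
          simp only [pvMeas, List.map_cons, List.sum_cons] at hn ⊢
          have hx : 4 ^ ((x :: a').length + b'.length) ≤ 4 ^ (a'.length + b'.length) * 4 := by
            simp only [List.length_cons]
            rw [show a'.length + 1 + b'.length = (a'.length + b'.length) + 1 by omega, pow_succ]
          have hy : 4 ^ ((x :: a').length + (y :: b').length) = 4 ^ (a'.length + b'.length) * 4 * 4 := by
            simp only [List.length_cons]
            rw [show a'.length + 1 + (b'.length + 1) = (a'.length + b'.length) + 1 + 1 by omega,
              pow_succ, pow_succ]
          omega
        have h1 : pvMeas ((pre ++ [x], a', y :: b') :: (pre ++ [y], x :: a', b') ::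
            (pre ++ [pvPseudoAdd x y], a', b') :: st) < n := by
          simp only [pvMeas, List.map_cons, List.sum_cons] at hn ⊢
          have hk : 4 ^ ((x :: a').length + (y :: b').length) = 4 ^ (a'.length + b'.length) * 4 * 4 := by
            simp only [List.length_cons]
            rw [show a'.length + 1 + (b'.length + 1) = (a'.length + b'.length) + 1 + 1 by omega,
              pow_succ, pow_succ]
          have ha : 4 ^ (a'.length + (y :: b').length) = 4 ^ (a'.length + b'.length) * 4 := by
            simp only [List.length_cons]
            rw [show a'.length + (b'.length + 1) = (a'.length + b'.length) + 1 by omega, pow_succ]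
          have hb : 4 ^ ((x :: a').length + b'.length) = 4 ^ (a'.length + b'.length) * 4 := by
            simp only [List.length_cons]
            rw [show a'.length + 1 + b'.length = (a'.length + b'.length) + 1 by omega, pow_succ]
          omega
        rw [if_pos hpa]
        simp only [List.cons_append, List.nil_append]
        rw [ih _ h1 _ _ _ _ (Nat.le_refl _)]
        rw [ih _ h2 _ _ _ _ (Nat.le_refl _)]
        rw [ih _ h3 _ _ _ _ (Nat.le_refl _)]
        simp [pvStuffle, pvStuffleRow, hpa, List.map_map, Function.comp_def, List.append_assoc]
      · have h2' : pvMeas ((pre ++ [y], x :: a', b') :: st) < n := by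
          simp only [pvMeas, List.map_cons, List.sum_cons] at hn ⊢
          have hx : 4 ^ ((x :: a').length + b'.length) = 4 ^ (a'.length + b'.length) * 4 := by
            simp only [List.length_cons]
            rw [show a'.length + 1 + b'.length = (a'.length + b'.length) + 1 by omega, pow_succ]
          have hy : 4 ^ ((x :: a').length + (y :: b').length) = 4 ^ (a'.length + b'.length) * 4 * 4 := by
            simp only [List.length_cons]
            rw [show a'.length + 1 + (b'.length + 1) = (a'.length + b'.length) + 1 + 1 by omega,
              pow_succ, pow_succ]
          omega
        have h1' : pvMeas ((pre ++ [x], a', y :: b') :: (pre ++ [y], x :: a', b') :: st) < n := by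
          simp only [pvMeas, List.map_cons, List.sum_cons] at hn ⊢
          have hk : 4 ^ ((x :: a').length + (y :: b').length) = 4 ^ (a'.length + b'.length) * 4 * 4 := by
            simp only [List.length_cons]
            rw [show a'.length + 1 + (b'.length + 1) = (a'.length + b'.length) + 1 + 1 by omega,
              pow_succ, pow_succ]
          have ha : 4 ^ (a'.length + (y :: b').length) = 4 ^ (a'.length + b'.length) * 4 := by
            simp only [List.length_cons]
            rw [show a'.length + (b'.length + 1) = (a'.length + b'.length) + 1 by omega, pow_succ]
          have hb : 4 ^ ((x :: a').length + b'.length) = 4 ^ (a'.length + b'.length) * 4 := by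
            simp only [List.length_cons]
            rw [show a'.length + 1 + b'.length = (a'.length + b'.length) + 1 by omega, pow_succ]
          omega
        rw [if_neg hpa]
        simp only [List.cons_append, List.nil_append]
        rw [ih _ h1' _ _ _ _ (Nat.le_refl _)]
        rw [ih _ h2' _ _ _ _ (Nat.le_refl _)]
        simp [pvStuffle, pvStuffleRow, hpa, List.map_map, Function.comp_def, List.append_assoc]

-- ===== VERDICT (by name: the statement is the Claim_ definition above) =====
theorem stuffle_product_spec : Claim_equal_stuffle_product := by
  intro l1 l2 _
  unfold Spec_stuffle_product stuffle_product stuffle_product_alt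
  rw [pvRun_frame (pvMeas [([], l1, l2)]) [] l1 l2 [] (Nat.le_refl _)]
  simp [pvRun]
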